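-- pv_equiv track=rewrite | github.com/MitkoVtori/Softuniada-2023 | competitive programming/03. Longest Valid Parentheses.py | valid_parentheses_combinations
-- ===== SOURCE A (Python) =====
-- def valid_parentheses_combinations(expression):
--     symbols = []
--     current_symbols = []
--
--     for index, char in enumerate(expression):
--         try:
--             if char == "(":
--                 if expression[index + 1] == ")":
--                     current_symbols.append(char), current_symbols.append(expression[index + 1])
--
--                 else:
--                     if len(current_symbols) > len(symbols):
--                         symbols = current_symbols
--                     current_symbols = []
--         except IndexError:
--             break
--
--     if len(current_symbols) > len(symbols):
--         symbols = current_symbols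
--
--     return len(symbols)
-- ===== SOURCE B (Python) =====
-- def valid_parentheses_combinations(expression):
--     # split-then-count: cut the string at every '(' not immediately followed by ')'
--     # (a trailing '(' is also a cut); in each segment every '(' starts a '()' pair.
--     segments = []
--     start = 0
--     for i, ch in enumerate(expression):
--         if ch == '(' and expression[i + 1:i + 2] != ')':
--             segments.append(expression[start:i])
--             start = i + 1
--     segments.append(expression[start:])
--     return 2 * max(seg.count('(') for seg in segments)
-- ===== Notes on version B (the rewrite author's own statement) =====
-- stated objective: alternative
-- what changed: A's single pass with running current/best symbol lists and a try/except lookahead is replaced by a split-then-count strategy: the string is cut at every '(' not immediately followed by ')' (including a trailing '('), and the result is 2 * max of the '(' count per segment.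
import Mathlib
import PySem

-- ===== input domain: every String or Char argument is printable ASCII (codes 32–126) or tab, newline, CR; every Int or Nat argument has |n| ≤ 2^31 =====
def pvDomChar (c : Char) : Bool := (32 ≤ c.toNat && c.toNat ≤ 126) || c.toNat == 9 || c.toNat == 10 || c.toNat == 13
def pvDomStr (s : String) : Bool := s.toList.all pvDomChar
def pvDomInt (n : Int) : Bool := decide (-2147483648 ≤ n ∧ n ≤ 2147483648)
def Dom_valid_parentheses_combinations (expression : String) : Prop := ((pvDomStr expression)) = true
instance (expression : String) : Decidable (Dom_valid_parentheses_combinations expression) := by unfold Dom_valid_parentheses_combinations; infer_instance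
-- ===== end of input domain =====

-- B replaces A's running-state single pass by split-then-count: cut the string at every
-- '(' not immediately followed by ')' and return 2 * max of '(' counts per segment (objective: alternative).

-- ===== PORT A =====
def pvA_loop (s : List Char) : List (Int × Char) → List Char → List Char → Int
  | [], syms, cur =>
      if cur.length > syms.length then (cur.length : Int) else (syms.length : Int)
  | (i, c) :: rest, syms, cur =>
      if c = '(' then
        match PySem.List.pyGet? s (i + 1) with
        | none =>
            -- IndexError on expression[index + 1] → break, then the final compare
            if cur.length > syms.length then (cur.length : Int) else (syms.length : Int)
        | some n =>
            if n = ')' then pvA_loop s rest syms (cur ++ [c, n])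
            else pvA_loop s rest (if cur.length > syms.length then cur else syms) []
      else pvA_loop s rest syms cur

def valid_parentheses_combinations (expression : String) : Int :=
  pvA_loop expression.toList (PySem.List.enumerate expression.toList 0) [] []

-- ===== PORT B =====
def pvB_loop (s : List Char) : List (Int × Char) → List (List Char) → Int → List (List Char) × Int
  | [], segs, start => (segs, start)
  | (i, ch) :: rest, segs, start =>
      if ch = '(' ∧ PySem.List.slice s (some (i + 1)) (some (i + 2)) ≠ [')'] then
        pvB_loop s rest (segs ++ [PySem.List.slice s (some start) (some i)]) (i + 1)
      else pvB_loop s rest segs start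

def pvB_finish (s : List Char) (segs : List (List Char)) (start : Int) : Int :=
  let segs2 := segs ++ [PySem.List.slice s (some start) none]
  let counts := segs2.map (fun seg => (PySem.List.count seg '(' : Int))
  match PySem.List.max? counts (fun x => x) with
  | some m => 2 * m
  | none => 0   -- unreachable: segs2 is nonempty

def valid_parentheses_combinations_alt (expression : String) : Int :=
  let s := expression.toList
  let p := pvB_loop s (PySem.List.enumerate s 0) [] 0
  pvB_finish s p.1 p.2

-- ===== PRECONDITION & SPEC =====
def Spec_valid_parentheses_combinations (expression : String) (out : Int) : Prop := out = valid_parentheses_combinations_alt expression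
instance (expression : String) (out : Int) : Decidable (Spec_valid_parentheses_combinations expression out) := by unfold Spec_valid_parentheses_combinations; infer_instance

-- ===== CLAIM (what is proved, stated in full; the proofs are below) =====
def Claim_equal_valid_parentheses_combinations : Prop := ∀ (expression : String), Dom_valid_parentheses_combinations expression → Spec_valid_parentheses_combinations expression (valid_parentheses_combinations expression)

-- ===== LEMMAS AND PROOFS =====

-- proof-side abstraction of A's pass: b, c are the lengths of symbols/current_symbols
def pvG : List Char → Nat → Nat → Nat
  | [], b, c => if c > b then c else b
  | ch :: rest, b, c =>
      if ch = '(' then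
        match rest with
        | [] => if c > b then c else b
        | n :: _ => if n = ')' then pvG rest b (c + 2) else pvG rest (if c > b then c else b) 0
      else pvG rest b c

-- proof-side abstraction of B's splitter: ccur is the segment accumulated so far
def pvSegs : List Char → List Char → List (List Char)
  | [], ccur => [ccur]
  | ch :: rest, ccur =>
      if ch = '(' ∧ rest.head? ≠ some ')' then ccur :: pvSegs rest []
      else pvSegs rest (ccur ++ [ch])

def pvCount (L : List (List Char)) : Int :=
  match PySem.List.max? (L.map (fun seg => (PySem.List.count seg '(' : Int))) (fun x => x) with
  | some m => 2 * m
  | none => 0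

lemma pvA_loop_eq (suf : List Char) : ∀ (pre syms cur : List Char),
    pvA_loop (pre ++ suf) (PySem.List.enumerate suf (pre.length : Int)) syms cur
      = (pvG suf syms.length cur.length : Int) := by
  induction suf with
  | nil => intro pre syms cur; simp [pvA_loop, pvG, PySem.List.enumerate]
  | cons ch rest ih =>
    intro pre syms cur
    rw [PySem.List.enumerate_cons]
    have hget : PySem.List.pyGet? (pre ++ ch :: rest) ((pre.length : Int) + 1) = rest[0]? := by
      simpa using PySem.List.pyGet?_append_right pre (ch :: rest) 1
    have hpre : ∀ t : List Char, pre ++ ch :: t = (pre ++ [ch]) ++ t := by intro t; simp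
    have hlen : ((pre ++ [ch]).length : Int) = (pre.length : Int) + 1 := by simp
    by_cases hch : ch = '('
    · subst hch
      cases rest with
      | nil =>
        simp only [pvA_loop, hget, List.getElem?_nil, if_true]
        simp [pvG]
      | cons n rest' =>
        simp only [pvA_loop, hget, List.getElem?_cons_zero, if_true]
        by_cases hn : n = ')'
        · subst hn
          rw [if_pos rfl, hpre (')' :: rest'), ← hlen,
            ih (pre ++ ['(']) syms (cur ++ ['(', ')'])]
          simp [pvG]
        · rw [if_neg hn, hpre (n :: rest'), ← hlen,
            ih (pre ++ ['(']) (if cur.length > syms.length then cur else syms) []]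
          simp [pvG, hn, apply_ite List.length]
    · simp only [pvA_loop, if_neg hch]
      rw [hpre rest, ← hlen, ih (pre ++ [ch]) syms cur]
      simp [pvG, hch]

lemma pvB_loop_eq (suf : List Char) : ∀ (pre : List Char) (segs : List (List Char)) (start : Nat),
    start ≤ pre.length →
    pvB_finish (pre ++ suf)
        (pvB_loop (pre ++ suf) (PySem.List.enumerate suf (pre.length : Int)) segs (start : Int)).1
        (pvB_loop (pre ++ suf) (PySem.List.enumerate suf (pre.length : Int)) segs (start : Int)).2
      = pvCount (segs ++ pvSegs suf (pre.drop start)) := by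
  induction suf with
  | nil =>
    intro pre segs start hstart
    simp only [PySem.List.enumerate, pvB_loop, List.append_nil]
    simp [pvB_finish, pvCount, pvSegs, PySem.List.slice_from_natCast]
  | cons ch rest ih =>
    intro pre segs start hstart
    rw [PySem.List.enumerate_cons]
    have hpre : ∀ t : List Char, pre ++ ch :: t = (pre ++ [ch]) ++ t := by intro t; simp
    have hlen : ((pre ++ [ch]).length : Int) = (pre.length : Int) + 1 := by simp
    have hdrop1 : (pre ++ ch :: rest).drop (pre.length + 1) = rest := by
      rw [hpre rest, List.drop_left' (by simp)]
    have hslice1 : PySem.List.slice (pre ++ ch :: rest) (some ((pre.length : Int) + 1))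
        (some ((pre.length : Int) + 2)) = rest.take 1 := by
      rw [show ((pre.length : Int) + 1) = ((pre.length + 1 : Nat) : Int) by push_cast; ring,
        show ((pre.length : Int) + 2) = ((pre.length + 2 : Nat) : Int) by push_cast; ring,
        PySem.List.slice_natCast, hdrop1]
      congr 1
      omega
    have hcond : (rest.take 1 ≠ [')']) ↔ rest.head? ≠ some ')' := by
      cases rest with
      | nil => simp
      | cons y t => simp [List.take]
    have hccur : PySem.List.slice (pre ++ ch :: rest) (some (start : Int))
        (some (pre.length : Int)) = pre.drop start := by
      rw [PySem.List.slice_natCast, List.drop_append_of_le_length hstart]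
      exact List.take_left' (by simp)
    by_cases h : ch = '(' ∧ rest.head? ≠ some ')'
    · obtain ⟨hch, hh⟩ := h
      subst hch
      have hc : True ∧ PySem.List.slice (pre ++ '(' :: rest)
          (some ((pre.length : Int) + 1)) (some ((pre.length : Int) + 2)) ≠ [')'] :=
        ⟨trivial, by rw [hslice1]; exact hcond.mpr hh⟩
      simp only [pvB_loop]
      rw [if_pos hc, hccur]
      have hthis := ih (pre ++ ['(']) (segs ++ [pre.drop start]) (pre.length + 1) (by simp)
      rw [hlen] at hthis
      push_cast at hthis
      rw [← hpre rest] at hthis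
      have hnil : List.drop (pre.length + 1) (pre ++ ['(']) = [] := by
        apply List.drop_eq_nil_of_le
        simp
      rw [hthis, hnil]
      simp [pvSegs, hh]
    · have hc : ¬ (ch = '(' ∧ PySem.List.slice (pre ++ ch :: rest)
          (some ((pre.length : Int) + 1)) (some ((pre.length : Int) + 2)) ≠ [')']) := by
        rw [hslice1]
        intro hcontra
        exact h ⟨hcontra.1, hcond.mp hcontra.2⟩
      simp only [pvB_loop]
      rw [if_neg hc]
      have hthis := ih (pre ++ [ch]) segs start (by simp; omega)
      rw [hlen] at hthis
      rw [← hpre rest] at hthis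
      rw [hthis, List.drop_append_of_le_length hstart]
      simp [pvSegs, h]

lemma pvFold_max_init (L : List (List Char)) : ∀ a b : Nat,
    L.foldl (fun acc seg => max acc (2 * seg.count '(')) (max a b)
      = max a (L.foldl (fun acc seg => max acc (2 * seg.count '(')) b) := by
  induction L with
  | nil => intro a b; rfl
  | cons x t ih =>
    intro a b
    simp only [List.foldl_cons, Nat.max_assoc, ih]

lemma pvG_eq (suf : List Char) : ∀ (ccur : List Char) (b : Nat),
    pvG suf b (2 * ccur.count '(')
      = max b ((pvSegs suf ccur).foldl (fun acc seg => max acc (2 * seg.count '(')) 0) := by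
  induction suf with
  | nil => intro ccur b; simp [pvG, pvSegs]; split_ifs <;> omega
  | cons ch rest ih =>
    intro ccur b
    by_cases hch : ch = '('
    · subst hch
      cases rest with
      | nil =>
        simp [pvG, pvSegs]
        split_ifs <;> omega
      | cons n rest' =>
        by_cases hn : n = ')'
        · subst hn
          have hne : (')' : Char) ≠ '(' := by decide
          have H := ih (ccur ++ ['(']) b
          simp [pvG, pvSegs, hne, List.count_append, Nat.mul_add] at H ⊢
          exact H
        · have H := ih [] (max b (2 * ccur.count '('))
          simp [pvG, pvSegs, hn] at H ⊢
          have hmax : (if b < 2 * List.count '(' ccur then 2 * List.count '(' ccur else b)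
              = max b (2 * List.count '(' ccur) := by split_ifs <;> omega
          rw [hmax, H]
          conv_rhs => rw [← Nat.max_zero (2 * List.count '(' ccur), pvFold_max_init]
    · have H := ih (ccur ++ [ch]) b
      simp [pvG, pvSegs, hch, List.count_append] at H ⊢
      exact H

lemma pvSegs_ne_nil (suf : List Char) : ∀ ccur, pvSegs suf ccur ≠ [] := by
  induction suf with
  | nil => intro ccur; simp [pvSegs]
  | cons ch rest ih =>
    intro ccur
    by_cases h : ch = '(' ∧ rest.head? ≠ some ')'
    · simp [pvSegs, h]
    · simpa [pvSegs, h] using ih (ccur ++ [ch])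

lemma pvFoldCast (t : List (List Char)) : ∀ a : Nat,
    ((t.foldl (fun acc seg => max acc (2 * seg.count '(')) (2 * a) : Nat) : Int)
      = 2 * (t.map (fun seg => ((PySem.List.count seg '(' : Nat) : Int))).foldl max (a : Int) := by
  induction t with
  | nil => intro a; simp
  | cons x s ih =>
    intro a
    simp only [PySem.List.count_eq] at ih ⊢
    simp only [List.foldl_cons, List.map_cons]
    rw [show max (2 * a) (2 * x.count '(') = 2 * max a (x.count '(') by omega,
      ih (max a (x.count '(')), Nat.cast_max]

lemma pvBridge (s : List Char) : (pvG s 0 0 : Int) = pvCount (pvSegs s []) := by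
  have hG := pvG_eq s [] 0
  simp only [List.count_nil, Nat.mul_zero] at hG
  obtain ⟨x, t, hxt⟩ : ∃ x t, pvSegs s [] = x :: t := by
    cases hs : pvSegs s [] with
    | nil => exact absurd hs (pvSegs_ne_nil s [])
    | cons x t => exact ⟨x, t, rfl⟩
  rw [hxt] at hG
  unfold pvCount
  rw [hxt]
  simp only [List.map_cons, PySem.List.max?_id_cons]
  have hfold := pvFoldCast t (x.count '(')
  simp only [PySem.List.count_eq] at hfold ⊢
  simp only [List.foldl_cons, Nat.zero_max] at hG
  rw [hG]
  exact hfold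

-- ===== VERDICT (by name: the statement is the Claim_ definition above) =====
theorem valid_parentheses_combinations_spec : Claim_equal_valid_parentheses_combinations := by
  intro expression _
  unfold Spec_valid_parentheses_combinations valid_parentheses_combinations valid_parentheses_combinations_alt
  have hA := pvA_loop_eq expression.toList [] [] []
  have hB := pvB_loop_eq expression.toList [] [] 0 (by simp)
  simp only [List.nil_append, List.length_nil, Nat.cast_zero, List.drop_nil] at hA hB
  rw [hA]
  rw [hB]
  exact pvBridge expression.toList
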